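-- pv_equiv track=rewrite | github.com/Harry-Xiaoo/works | BSAlign.py | align_read_to_reference
-- ===== SOURCE A (Python) =====
-- def align_read_to_reference(read, reference, allow_mismatch=True):
--     """
--     将一个 read 与参考序列进行比对，允许 C-T/G-A 模糊匹配。
--     返回匹配位置和得分。
--     """
--     best_score = -1
--     best_position = -1
--
--     for i in range(len(reference) - len(read) + 1):
--         # 提取比对窗口
--         window = reference[i:i+len(read)]
--
--         # 比对得分计算
--         score = 0
--         for r_base, w_base in zip(read, window):
--             if r_base == w_base:
--                 score += 1
--             elif allow_mismatch and ((r_base == 'C' and w_base == 'T') or (r_base == 'G' and w_base == 'A')):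
--                 score += 1
--
--         # 更新最佳匹配
--         if score > best_score:
--             best_score = score
--             best_position = i
--
--     return best_position, best_score
-- ===== SOURCE B (Python) =====
-- def align_read_to_reference(read, reference, allow_mismatch=True):
--     # Transposed accumulation: one pass per read character updates the scores of
--     # all candidate offsets at once; then pick the maximum and its first offset.
--     n = len(reference) - len(read) + 1
--     if n <= 0:
--         return -1, -1
--     scores = [0] * n
--     for j, r in enumerate(read):
--         t = 'T' if (allow_mismatch and r == 'C') else 'A' if (allow_mismatch and r == 'G') else None
--         scores = [s + (1 if reference[i + j] == r or reference[i + j] == t else 0)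
--                   for i, s in enumerate(scores)]
--     best = max(scores)
--     return scores.index(best), best
-- ===== Notes on version B (the rewrite author's own statement) =====
-- stated objective: alternative
-- what changed: Replaces the per-offset window rescan with a loop-interchanged accumulation (each read character updates the score of every candidate offset in one sweep) followed by max/index argmax, instead of A's running-best over per-window inner scans.
import Mathlib
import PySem

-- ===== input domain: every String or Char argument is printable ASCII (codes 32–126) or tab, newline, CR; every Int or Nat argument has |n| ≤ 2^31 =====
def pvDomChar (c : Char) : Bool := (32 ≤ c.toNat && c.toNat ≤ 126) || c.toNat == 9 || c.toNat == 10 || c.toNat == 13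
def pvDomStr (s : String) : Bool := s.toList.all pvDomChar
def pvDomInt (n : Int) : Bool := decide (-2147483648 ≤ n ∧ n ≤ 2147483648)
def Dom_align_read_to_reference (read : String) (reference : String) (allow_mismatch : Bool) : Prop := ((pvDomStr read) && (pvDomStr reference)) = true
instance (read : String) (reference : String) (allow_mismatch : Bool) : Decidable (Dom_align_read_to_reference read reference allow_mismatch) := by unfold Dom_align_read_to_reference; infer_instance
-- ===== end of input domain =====

-- B replaces A's per-offset window rescan by a loop-interchanged accumulation (each read
-- character updates the scores of all candidate offsets in one sweep) followed by max/index;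
-- objective: alternative (same asymptotic cost, different algorithmic decomposition).

-- ===== PORT A =====
def align_read_to_reference (read : String) (reference : String) (allow_mismatch : Bool) : Int × Int :=
  let rl := read.toList
  let refl := reference.toList
  -- state (best_position, best_score), initially (-1, -1); returned as-is
  (PySem.List.pyRange 0 ((refl.length : Int) - (rl.length : Int) + 1) 1).foldl
    (fun (best : Int × Int) (i : Int) =>
      let window := PySem.List.slice refl (some i) (some (i + (rl.length : Int)))
      let score := (rl.zip window).foldl
        (fun (score : Int) (p : Char × Char) =>
          if p.1 == p.2 then score + 1
          else if allow_mismatch && ((p.1 == 'C' && p.2 == 'T') || (p.1 == 'G' && p.2 == 'A')) then score + 1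
          else score) 0
      if score > best.2 then (i, score) else best)
    (-1, -1)

-- ===== PORT B =====
def align_read_to_reference_alt (read : String) (reference : String) (allow_mismatch : Bool) : Int × Int :=
  let rl := read.toList
  let refl := reference.toList
  let n : Int := (refl.length : Int) - (rl.length : Int) + 1
  if n ≤ 0 then (-1, -1)
  else
    let scores : List Int :=
      (PySem.List.enumerate rl).foldl
        (fun (scores : List Int) (jr : Int × Char) =>
          let t : Option Char :=
            if allow_mismatch && (jr.2 == 'C') then some 'T'
            else if allow_mismatch && (jr.2 == 'G') then some 'A'
            else none
          (PySem.List.enumerate scores).map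
            (fun is =>
              let w := PySem.List.pyGetD refl (is.1 + jr.1) ' '
              is.2 + (if (w == jr.2) || (some w == t) then 1 else 0)))
        (List.replicate n.toNat 0)
    match PySem.List.max? scores (fun x => x) with
    | some best => ((((PySem.List.index? scores best).getD 0 : Nat) : Int), best)
    | none => (-1, -1)   -- unreachable totality branch: scores is nonempty here

-- ===== PRECONDITION & SPEC =====
def Spec_align_read_to_reference (read : String) (reference : String) (allow_mismatch : Bool) (out : Int × Int) : Prop := out = align_read_to_reference_alt read reference allow_mismatch
instance (read : String) (reference : String) (allow_mismatch : Bool) (out : Int × Int) : Decidable (Spec_align_read_to_reference read reference allow_mismatch out) := by unfold Spec_align_read_to_reference; infer_instance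

-- ===== CLAIM (what is proved, stated in full; the proofs are below) =====
def Claim_equal_align_read_to_reference : Prop := ∀ (read : String) (reference : String) (allow_mismatch : Bool), Dom_align_read_to_reference read reference allow_mismatch → Spec_align_read_to_reference read reference allow_mismatch (align_read_to_reference read reference allow_mismatch)

-- ===== LEMMAS AND PROOFS =====

-- the common match predicate of both programs
def pvP (allow : Bool) (p : Char × Char) : Bool :=
  (p.1 == p.2) || (allow && ((p.1 == 'C' && p.2 == 'T') || (p.1 == 'G' && p.2 == 'A')))

-- the count B accumulates at offset k while consuming read characters from position j on
def pvCnt (allow : Bool) (refl : List Char) : List Char → Int → Int → Int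
  | [], _, _ => 0
  | r :: rs, j, k =>
      (if pvP allow (r, PySem.List.pyGetD refl (k + j) ' ') then 1 else 0) + pvCnt allow refl rs (j + 1) k

-- the argmax update step of A, seen over enumerated scores
def pvUpd (st : Int × Int) (iv : Int × Int) : Int × Int := if iv.2 > st.2 then (iv.1, iv.2) else st

-- B's per-character indicator equals the common predicate
theorem pvInd_eq (allow : Bool) (r w : Char) :
    ((w == r) || (some w == (if allow && (r == 'C') then some 'T'
                             else if allow && (r == 'G') then some 'A' else none)))
      = pvP allow (r, w) := by
  cases allow <;> simp only [pvP, Bool.true_and, Bool.false_and, Bool.or_false] <;>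
    by_cases h1 : r = 'C' <;> by_cases h2 : r = 'G' <;> simp_all [Bool.beq_comm]

-- A's nested elif step is the indicator of the common predicate
theorem pvAstep_eq (allow : Bool) (s : Int) (p : Char × Char) :
    (if p.1 == p.2 then s + 1
     else if allow && ((p.1 == 'C' && p.2 == 'T') || (p.1 == 'G' && p.2 == 'A')) then s + 1
     else s)
      = (if pvP allow p then s + 1 else s) := by
  simp only [pvP]
  by_cases h1 : (p.1 == p.2) = true <;> simp [h1]

theorem pvZipTake {α β : Type} (xs : List α) (ys : List β) :
    xs.zip (ys.take xs.length) = xs.zip ys := by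
  induction xs generalizing ys with
  | nil => simp
  | cons x t ih => cases ys <;> simp [ih]

theorem pvCnt_nonneg (allow : Bool) (refl rs : List Char) (j k : Int) :
    0 ≤ pvCnt allow refl rs j k := by
  induction rs generalizing j with
  | nil => simp [pvCnt]
  | cons r rs ih => simp only [pvCnt]; have := ih (j + 1); split <;> omega

-- pvCnt is the zip-count when all touched indices are in range
theorem pvCnt_eq_countP (allow : Bool) (refl : List Char) (rs : List Char) (j k : Int)
    (hj : 0 ≤ j) (hk : 0 ≤ k) (hle : k + j + rs.length ≤ refl.length) :
    pvCnt allow refl rs j k = ((rs.zip (refl.drop (k + j).toNat)).countP (pvP allow) : Int) := by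
  induction rs generalizing j with
  | nil => simp [pvCnt]
  | cons r rs ih =>
      have hlt : (k + j).toNat < refl.length := by
        simp only [List.length_cons] at hle; omega
      rw [List.drop_eq_getElem_cons hlt]
      simp only [pvCnt, List.zip_cons_cons, List.countP_cons]
      rw [PySem.List.pyGetD_eq_getElem refl ' ' (by omega) (by omega)]
      have h2 : (k + (j + 1)).toNat = (k + j).toNat + 1 := by omega
      rw [ih (j + 1) (by omega) (by simp only [List.length_cons] at hle; push_cast; omega), h2]
      split <;> omega

-- the B fold preserves length
theorem pvB_length (allow : Bool) (refl : List Char) (rs : List Char) (j : Int) (scores : List Int) :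
    ((PySem.List.enumerate rs j).foldl
      (fun (scores : List Int) (jr : Int × Char) =>
        let t : Option Char :=
          if allow && (jr.2 == 'C') then some 'T'
          else if allow && (jr.2 == 'G') then some 'A'
          else none
        (PySem.List.enumerate scores).map
          (fun is =>
            let w := PySem.List.pyGetD refl (is.1 + jr.1) ' '
            is.2 + (if (w == jr.2) || (some w == t) then 1 else 0)))
      scores).length = scores.length := by
  induction rs generalizing j scores with
  | nil => simp [PySem.List.enumerate]
  | cons r rs ih =>
      rw [PySem.List.enumerate_cons]
      simp only [List.foldl_cons]
      rw [ih]
      simp [PySem.List.length_enumerate]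

-- element characterisation of the B fold
theorem pvB_getElem? (allow : Bool) (refl : List Char) (rs : List Char) (j : Int) (scores : List Int)
    (k : Nat) :
    ((PySem.List.enumerate rs j).foldl
      (fun (scores : List Int) (jr : Int × Char) =>
        let t : Option Char :=
          if allow && (jr.2 == 'C') then some 'T'
          else if allow && (jr.2 == 'G') then some 'A'
          else none
        (PySem.List.enumerate scores).map
          (fun is =>
            let w := PySem.List.pyGetD refl (is.1 + jr.1) ' '
            is.2 + (if (w == jr.2) || (some w == t) then 1 else 0)))
      scores)[k]? = scores[k]?.map (· + pvCnt allow refl rs j (k : Int)) := by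
  induction rs generalizing j scores with
  | nil =>
      simp only [PySem.List.enumerate, List.foldl_nil, pvCnt]
      cases scores[k]? <;> simp
  | cons r rs ih =>
      rw [PySem.List.enumerate_cons]
      simp only [List.foldl_cons]
      rw [ih (j+1)]
      rw [List.getElem?_map, PySem.List.getElem?_enumerate]
      simp only [pvCnt, Option.map_map]
      cases h : scores[k]? with
      | none => simp
      | some v =>
          simp only [Option.map_some, Function.comp, zero_add]
          rw [pvInd_eq]
          congr 1
          ring

-- no strict improvement: the argmax fold leaves the state alone
theorem pvG1 (l : List Int) (s bp bs : Int) (h : ∀ x ∈ l, x ≤ bs) :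
    (PySem.List.enumerate l s).foldl pvUpd (bp, bs) = (bp, bs) := by
  induction l generalizing s with
  | nil => simp [PySem.List.enumerate]
  | cons x t ih =>
      rw [PySem.List.enumerate_cons]
      simp only [List.foldl_cons]
      have hx : ¬ x > bs := by have := h x (by simp); omega
      rw [show pvUpd (bp, bs) (s, x) = (bp, bs) by simp [pvUpd, hx]]
      exact ih (s + 1) (fun y hy => h y (by simp [hy]))

-- first-argmax characterisation of A's running-best fold
theorem pvG2 (l : List Int) (s bp bs : Int) (h : ∃ x ∈ l, bs < x) :
    (PySem.List.enumerate l s).foldl pvUpd (bp, bs)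
      = (s + (((PySem.List.index? l (l.foldl max bs)).getD 0 : Nat) : Int), l.foldl max bs) := by
  induction l generalizing s bp bs with
  | nil => simp at h
  | cons x t ih =>
      rw [PySem.List.enumerate_cons]
      simp only [List.foldl_cons]
      by_cases hx : bs < x
      · rw [show pvUpd (bp, bs) (s, x) = (s, x) by simp [pvUpd, hx],
            max_eq_right (le_of_lt hx)]
        by_cases ht : ∃ y ∈ t, x < y
        · rw [ih (s+1) s x ht]
          obtain ⟨y, hyt, hxy⟩ := ht
          have hMy := (PySem.List.le_foldl_max t x).2 y hyt
          have hne : x ≠ List.foldl max x t := by omega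
          rw [PySem.List.index?_cons_of_ne t hne]
          have hMmem : List.foldl max x t ∈ t := by
            rcases PySem.List.foldl_max_mem t x with hm | hm
            · omega
            · exact hm
          obtain ⟨i, hi⟩ := Option.isSome_iff_exists.mp
            ((PySem.List.index?_isSome_iff t _).mpr hMmem)
          rw [hi]
          simp
          ring
        · push_neg at ht
          rw [pvG1 t (s+1) s x ht]
          have hmax : List.foldl max x t = x := by
            rcases PySem.List.foldl_max_mem t x with hm | hm
            · exact hm
            · exact le_antisymm (ht _ hm) (PySem.List.le_foldl_max t x).1
          rw [hmax, PySem.List.index?_cons_self]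
          simp
      · push_neg at hx
        rw [show pvUpd (bp, bs) (s, x) = (bp, bs) by simp [pvUpd]; omega,
            max_eq_left hx]
        obtain ⟨y, hy, hby⟩ := h
        have hyt : y ∈ t := by
          rcases List.mem_cons.mp hy with rfl | h'
          · omega
          · exact h'
        rw [ih (s+1) bp bs ⟨y, hyt, hby⟩]
        have hMy := (PySem.List.le_foldl_max t bs).2 y hyt
        have hMmem : List.foldl max bs t ∈ t := by
          rcases PySem.List.foldl_max_mem t bs with hm | hm
          · omega
          · exact hm
        have hne : x ≠ List.foldl max bs t := by omega
        rw [PySem.List.index?_cons_of_ne t hne]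
        obtain ⟨i, hi⟩ := Option.isSome_iff_exists.mp
          ((PySem.List.index?_isSome_iff t _).mpr hMmem)
        rw [hi]
        simp
        ring

-- an index fold over the score list is the enumerate fold
theorem pvFoldRange (scores : List Int) :
    (PySem.List.pyRange 0 (scores.length : Int) 1).foldl
      (fun st i => pvUpd st (i, PySem.List.pyGetD scores i 0)) ((-1 : Int), (-1 : Int))
      = (PySem.List.enumerate scores).foldl pvUpd (-1, -1) := by
  rw [PySem.List.enumerate_eq_map_pyRange scores 0, List.foldl_map]
  simp [PySem.List.len]

-- the whole equivalence, over the underlying character lists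
theorem pvMain (allow : Bool) (rl refl : List Char) :
    (PySem.List.pyRange 0 ((refl.length : Int) - (rl.length : Int) + 1) 1).foldl
      (fun (best : Int × Int) (i : Int) =>
        let window := PySem.List.slice refl (some i) (some (i + (rl.length : Int)))
        let score := (rl.zip window).foldl
          (fun (score : Int) (p : Char × Char) =>
            if p.1 == p.2 then score + 1
            else if allow && ((p.1 == 'C' && p.2 == 'T') || (p.1 == 'G' && p.2 == 'A')) then score + 1
            else score) 0
        if score > best.2 then (i, score) else best)
      (-1, -1)
    = (if ((refl.length : Int) - (rl.length : Int) + 1) ≤ 0 then ((-1 : Int), (-1 : Int))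
       else
        let scores : List Int :=
          (PySem.List.enumerate rl).foldl
            (fun (scores : List Int) (jr : Int × Char) =>
              let t : Option Char :=
                if allow && (jr.2 == 'C') then some 'T'
                else if allow && (jr.2 == 'G') then some 'A'
                else none
              (PySem.List.enumerate scores).map
                (fun is =>
                  let w := PySem.List.pyGetD refl (is.1 + jr.1) ' '
                  is.2 + (if (w == jr.2) || (some w == t) then 1 else 0)))
            (List.replicate ((refl.length : Int) - (rl.length : Int) + 1).toNat 0)
        match PySem.List.max? scores (fun x => x) with
        | some best => ((((PySem.List.index? scores best).getD 0 : Nat) : Int), best)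
        | none => (-1, -1)) := by
  set n : Int := (refl.length : Int) - (rl.length : Int) + 1 with hn
  by_cases hle : n ≤ 0
  · rw [if_pos hle, PySem.List.pyRange_one_eq_nil hle, List.foldl_nil]
  · rw [if_neg hle]
    push_neg at hle
    set scores : List Int :=
      (PySem.List.enumerate rl).foldl
        (fun (scores : List Int) (jr : Int × Char) =>
          let t : Option Char :=
            if allow && (jr.2 == 'C') then some 'T'
            else if allow && (jr.2 == 'G') then some 'A'
            else none
          (PySem.List.enumerate scores).map
            (fun is =>
              let w := PySem.List.pyGetD refl (is.1 + jr.1) ' '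
              is.2 + (if (w == jr.2) || (some w == t) then 1 else 0)))
        (List.replicate n.toNat 0) with hscores
    have hlenS : scores.length = n.toNat := by
      rw [hscores, pvB_length]; simp
    have helem : ∀ k : Nat, k < n.toNat → scores[k]? = some (pvCnt allow refl rl 0 (k : Int)) := by
      intro k hk
      rw [hscores, pvB_getElem?]
      rw [List.getElem?_replicate]
      simp [hk]
    -- step 1: A's body is pvUpd against the score table
    have hcongr : ∀ (acc : Int × Int), ∀ i ∈ PySem.List.pyRange 0 n 1,
        (let window := PySem.List.slice refl (some i) (some (i + (rl.length : Int)))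
         let score := (rl.zip window).foldl
           (fun (score : Int) (p : Char × Char) =>
             if p.1 == p.2 then score + 1
             else if allow && ((p.1 == 'C' && p.2 == 'T') || (p.1 == 'G' && p.2 == 'A')) then score + 1
             else score) 0
         if score > acc.2 then (i, score) else acc)
        = pvUpd acc (i, PySem.List.pyGetD scores i 0) := by
      intro acc i hi
      obtain ⟨hi0, hin⟩ := PySem.List.mem_pyRange_one.mp hi
      show (if ((rl.zip (PySem.List.slice refl (some i) (some (i + (rl.length : Int))))).foldl
               (fun (score : Int) (p : Char × Char) =>
                 if p.1 == p.2 then score + 1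
                 else if allow && ((p.1 == 'C' && p.2 == 'T') || (p.1 == 'G' && p.2 == 'A')) then score + 1
                 else score) 0) > acc.2
            then (i, _) else acc) = _
      rw [PySem.List.slice_toNat refl hi0 (by positivity)]
      have hm : (i + (rl.length : Int)).toNat - i.toNat = rl.length := by omega
      rw [hm, pvZipTake rl]
      rw [show (fun (score : Int) (p : Char × Char) =>
            if p.1 == p.2 then score + 1
            else if allow && ((p.1 == 'C' && p.2 == 'T') || (p.1 == 'G' && p.2 == 'A')) then score + 1
            else score)
          = (fun (s : Int) (p : Char × Char) => if pvP allow p then s + 1 else s) from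
        funext fun s => funext fun p => pvAstep_eq allow s p]
      rw [PySem.List.foldl_if_add_one (pvP allow)]
      have hcnt := pvCnt_eq_countP allow refl rl 0 i (le_refl 0) hi0 (by omega)
      rw [add_zero] at hcnt
      rw [zero_add, ← hcnt]
      have hget : PySem.List.pyGetD scores i 0 = pvCnt allow refl rl 0 i := by
        rw [PySem.List.pyGetD_of_nonneg scores 0 hi0,
            List.getD_eq_getElem?_getD, helem i.toNat (by omega)]
        simp [Int.toNat_of_nonneg hi0]
      rw [show pvUpd acc (i, PySem.List.pyGetD scores i 0)
            = if pvCnt allow refl rl 0 i > acc.2 then (i, pvCnt allow refl rl 0 i) else acc by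
          simp [pvUpd, hget]]
    rw [PySem.List.foldl_congr_mem _ _ (fun st i => pvUpd st (i, PySem.List.pyGetD scores i 0)) _
      (fun acc i hi => hcongr acc i hi)]
    -- step 2: fold over indices = fold over enumerate
    have hnn : n = (scores.length : Int) := by rw [hlenS]; omega
    rw [hnn, pvFoldRange scores]
    -- step 3: first-argmax
    obtain ⟨c, t, hct⟩ : ∃ c t, scores = c :: t := by
      rcases scores with _ | ⟨c, t⟩
      · exfalso; simp at hlenS; omega
      · exact ⟨c, t, rfl⟩
    have hc0 : 0 ≤ c := by
      have := helem 0 (by omega)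
      rw [hct] at this
      simp at this
      rw [this]
      exact pvCnt_nonneg allow refl rl 0 0
    have hex : ∃ x ∈ scores, (-1 : Int) < x := ⟨c, by rw [hct]; simp, by omega⟩
    rw [pvG2 scores 0 (-1) (-1) hex]
    -- step 4: B's max/index agree
    have hmaxeq : scores.foldl max (-1) = t.foldl max c := by
      rw [hct]
      simp only [List.foldl_cons]
      rw [max_eq_right (by omega : (-1 : Int) ≤ c)]
    conv_rhs => rw [hct]
    show _ = (match PySem.List.max? (c :: t) (fun x => x) with
      | some best => ((((PySem.List.index? (c :: t) best).getD 0 : Nat) : Int), best)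
      | none => ((-1 : Int), (-1 : Int)))
    rw [PySem.List.max?_id_cons]
    simp only [← hct, hmaxeq, zero_add]

-- ===== VERDICT (by name: the statement is the Claim_ definition above) =====
theorem align_read_to_reference_spec : Claim_equal_align_read_to_reference := by
  intro read reference allow _
  unfold Spec_align_read_to_reference align_read_to_reference align_read_to_reference_alt
  exact pvMain allow read.toList reference.toList
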